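-- pv_equiv track=rewrite | github.com/pypi-data/pypi-mirror-397 | packages/shnitsel-tools/shnitsel_tools-0.0.2.dev2.tar.gz/shnitsel_tools-0.0.2.dev2/shnitsel/geo/geomatch.py | __get_dihedrals_by_indices
-- ===== SOURCE A (Python) =====
-- def __get_dihedrals_by_indices(match_list: list[tuple], d_dihedrals: dict) -> dict:
--     """
--     Flag dihedrals as active (1) if all four atoms (i, j, k, l)
--     belong to the same SMARTS match.
--
--     Parameters
--     ----------
--     match_list : list of tuples
--         SMARTS matches from __match_pattern.
--     d_dihedrals : dict
--         Output of __get_all_dihedrals().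
--
--     Returns
--     -------
--     dict
--         Updated dihedral dictionary with flags.
--     """
--     updated = []
--
--     for flag, (i, j, k, l) in d_dihedrals['dihedrals']:
--         active = any(
--             (i in match and j in match and k in match and l in match)
--             for match in match_list
--         )
--         updated.append((1 if active else 0, (i, j, k, l)))
--
--     return {'dihedrals': updated}
-- ===== SOURCE B (Python) =====
-- def __get_dihedrals_by_indices(match_list: list[tuple], d_dihedrals: dict) -> dict:
--     dihs = d_dihedrals['dihedrals']
--     # Stage 1: matches OUTERMOST — collect the set of dihedral tuples fully
--     # contained in some match.
--     active = set()
--     for match in match_list: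
--         ms = set(match)
--         for _flag, (i, j, k, l) in dihs:
--             if i in ms and j in ms and k in ms and l in ms:
--                 active.add((i, j, k, l))
--     # Stage 2: rebuild the list in the original order by membership in 'active'.
--     return {'dihedrals': [(1 if t in active else 0, t) for _flag, t in dihs]}
-- ===== Notes on version B (the rewrite author's own statement) =====
-- stated objective: alternative
-- what changed: B inverts the loop nesting: it iterates matches outermost, collecting once the set of dihedral tuples fully contained in some match, then rebuilds the list by membership in that set, instead of A's per-dihedral any-scan over all matches.
import Mathlib
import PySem

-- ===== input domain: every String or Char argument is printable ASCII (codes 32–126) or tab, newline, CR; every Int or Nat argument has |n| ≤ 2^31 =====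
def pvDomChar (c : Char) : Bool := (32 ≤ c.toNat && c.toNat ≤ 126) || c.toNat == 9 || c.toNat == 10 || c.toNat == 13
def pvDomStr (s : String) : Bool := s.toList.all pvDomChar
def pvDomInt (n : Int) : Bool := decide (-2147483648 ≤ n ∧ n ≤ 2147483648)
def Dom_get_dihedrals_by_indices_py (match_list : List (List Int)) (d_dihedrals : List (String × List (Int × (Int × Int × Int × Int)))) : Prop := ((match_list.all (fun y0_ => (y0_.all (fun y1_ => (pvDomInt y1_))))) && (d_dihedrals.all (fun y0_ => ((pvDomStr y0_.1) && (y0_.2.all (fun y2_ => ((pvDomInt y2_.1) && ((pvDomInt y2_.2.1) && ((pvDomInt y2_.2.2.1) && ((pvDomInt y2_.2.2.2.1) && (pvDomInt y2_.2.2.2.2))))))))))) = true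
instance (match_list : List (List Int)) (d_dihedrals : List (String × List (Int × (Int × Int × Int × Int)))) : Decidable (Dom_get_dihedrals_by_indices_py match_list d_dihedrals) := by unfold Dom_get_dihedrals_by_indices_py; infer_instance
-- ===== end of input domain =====

-- B inverts the loop nesting: matches outermost, collecting once the set of dihedral
-- tuples fully contained in some match, then rebuilds the list by set membership.

-- ===== PORT A =====
def get_dihedrals_by_indices_py (match_list : List (List Int)) (d_dihedrals : List (String × List (Int × (Int × Int × Int × Int)))) : List (String × List (Int × (Int × Int × Int × Int))) :=
  match (PySem.Dict.mk d_dihedrals).get? "dihedrals" with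
  | none => []   -- KeyError in Python; excluded by Pre_
  | some dihs =>
    let updated := dihs.foldl (fun acc p =>
      let i := p.2.1; let j := p.2.2.1; let k := p.2.2.2.1; let l := p.2.2.2.2
      let active := match_list.any (fun m => m.contains i && m.contains j && m.contains k && m.contains l)
      acc ++ [((if active then (1 : Int) else 0), (i, j, k, l))]) []
    [("dihedrals", updated)]

-- ===== PORT B =====
-- stage 1 of Source B: for match in match_list: ms = set(match);
--   for _f,(i,j,k,l) in dihs: if all four in ms: active.add((i,j,k,l))
def pvActiveSet (match_list : List (List Int)) (dihs : List (Int × (Int × Int × Int × Int))) : PySem.Set (Int × Int × Int × Int) :=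
  match_list.foldl (fun active m =>
    let ms := PySem.Set.ofList m
    dihs.foldl (fun active p =>
      if ms.contains p.2.1 && ms.contains p.2.2.1 && ms.contains p.2.2.2.1 && ms.contains p.2.2.2.2
      then PySem.Set.add active p.2 else active) active)
    PySem.Set.empty

def get_dihedrals_by_indices_py_alt (match_list : List (List Int)) (d_dihedrals : List (String × List (Int × (Int × Int × Int × Int)))) : List (String × List (Int × (Int × Int × Int × Int))) :=
  match (PySem.Dict.mk d_dihedrals).get? "dihedrals" with
  | none => []   -- KeyError in Python; excluded by Pre_
  | some dihs =>
    let active := pvActiveSet match_list dihs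
    -- stage 2: [(1 if t in active else 0, t) for _f, t in dihs]
    [("dihedrals", dihs.map (fun p => ((if active.contains p.2 then (1 : Int) else 0), p.2)))]

-- ===== PRECONDITION & SPEC =====
-- Pre_ excludes only the inputs whose dict lacks the key 'dihedrals', on which Python raises KeyError.
def Pre_get_dihedrals_by_indices_py (match_list : List (List Int)) (d_dihedrals : List (String × List (Int × (Int × Int × Int × Int)))) : Prop :=
  "dihedrals" ∈ d_dihedrals.map Prod.fst
instance (match_list : List (List Int)) (d_dihedrals : List (String × List (Int × (Int × Int × Int × Int)))) : Decidable (Pre_get_dihedrals_by_indices_py match_list d_dihedrals) := by unfold Pre_get_dihedrals_by_indices_py; infer_instance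
def pvWitness_get_dihedrals_by_indices_py : List (List Int) × (List (String × List (Int × (Int × Int × Int × Int)))) :=
  ([[1, 2, 3, 4]], [("dihedrals", [(0, (1, 2, 3, 4)), (0, (1, 2, 3, 9))])])

def Spec_get_dihedrals_by_indices_py (match_list : List (List Int)) (d_dihedrals : List (String × List (Int × (Int × Int × Int × Int)))) (out : List (String × List (Int × (Int × Int × Int × Int)))) : Prop := out = get_dihedrals_by_indices_py_alt match_list d_dihedrals
instance (match_list : List (List Int)) (d_dihedrals : List (String × List (Int × (Int × Int × Int × Int)))) (out : List (String × List (Int × (Int × Int × Int × Int)))) : Decidable (Spec_get_dihedrals_by_indices_py match_list d_dihedrals out) := by unfold Spec_get_dihedrals_by_indices_py; exact @instDecidableEqList _ instDecidableEqProd _ _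

-- ===== CLAIM =====
def Claim_equal_get_dihedrals_by_indices_py : Prop := ∀ (match_list : List (List Int)) (d_dihedrals : List (String × List (Int × (Int × Int × Int × Int)))), Dom_get_dihedrals_by_indices_py match_list d_dihedrals → Pre_get_dihedrals_by_indices_py match_list d_dihedrals → Spec_get_dihedrals_by_indices_py match_list d_dihedrals (get_dihedrals_by_indices_py match_list d_dihedrals)

-- ===== LEMMAS AND PROOFS =====

-- inner loop of stage 1: conditional-add over dihs
theorem pv_inner_mem (dihs : List (Int × (Int × Int × Int × Int)))
    (cond : (Int × Int × Int × Int) → Bool) (acc : PySem.Set (Int × Int × Int × Int))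
    (t : Int × Int × Int × Int) :
    t ∈ dihs.foldl (fun active p => if cond p.2 then PySem.Set.add active p.2 else active) acc
      ↔ t ∈ acc ∨ (cond t = true ∧ ∃ q ∈ dihs, q.2 = t) := by
  induction dihs generalizing acc with
  | nil => simp
  | cons x xs ih =>
    simp only [List.foldl_cons, ih, List.mem_cons]
    by_cases hc : cond x.2 = true
    · rw [if_pos hc]
      simp only [PySem.Set.mem_add]
      constructor
      · rintro ((h | rfl) | ⟨ht, q, hq, rfl⟩)
        · exact Or.inl h
        · exact Or.inr ⟨hc, x, Or.inl rfl, rfl⟩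
        · exact Or.inr ⟨ht, q, Or.inr hq, rfl⟩
      · rintro (h | ⟨ht, q, (rfl | hq), rfl⟩)
        · exact Or.inl (Or.inl h)
        · exact Or.inl (Or.inr rfl)
        · exact Or.inr ⟨ht, q, hq, rfl⟩
    · rw [if_neg hc]
      constructor
      · rintro (h | ⟨ht, q, hq, rfl⟩)
        · exact Or.inl h
        · exact Or.inr ⟨ht, q, Or.inr hq, rfl⟩
      · rintro (h | ⟨ht, q, (rfl | hq), rfl⟩)
        · exact Or.inl h
        · exact absurd ht hc
        · exact Or.inr ⟨ht, q, hq, rfl⟩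

-- stage 1 characterised: t is active iff it occurs in dihs and some match contains its four atoms
theorem pv_active_mem (ml : List (List Int)) (dihs : List (Int × (Int × Int × Int × Int)))
    (t : Int × Int × Int × Int) :
    t ∈ pvActiveSet ml dihs
      ↔ (∃ q ∈ dihs, q.2 = t) ∧
        ∃ m ∈ ml, t.1 ∈ m ∧ t.2.1 ∈ m ∧ t.2.2.1 ∈ m ∧ t.2.2.2 ∈ m := by
  unfold pvActiveSet
  suffices h : ∀ acc : PySem.Set (Int × Int × Int × Int),
      t ∈ ml.foldl (fun active m =>
        let ms := PySem.Set.ofList m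
        dihs.foldl (fun active p =>
          if ms.contains p.2.1 && ms.contains p.2.2.1 && ms.contains p.2.2.2.1 && ms.contains p.2.2.2.2
          then PySem.Set.add active p.2 else active) active) acc
      ↔ t ∈ acc ∨ ((∃ q ∈ dihs, q.2 = t) ∧
          ∃ m ∈ ml, t.1 ∈ m ∧ t.2.1 ∈ m ∧ t.2.2.1 ∈ m ∧ t.2.2.2 ∈ m) by
    rw [h]; simp [PySem.Set.empty]
  induction ml with
  | nil => simp
  | cons x xs ih =>
    intro acc
    simp only [List.foldl_cons, ih, List.mem_cons]
    rw [pv_inner_mem dihs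
      (fun t => (PySem.Set.ofList x).contains t.1 && (PySem.Set.ofList x).contains t.2.1 &&
        (PySem.Set.ofList x).contains t.2.2.1 && (PySem.Set.ofList x).contains t.2.2.2) acc t]
    have hc : ((PySem.Set.ofList x).contains t.1 && (PySem.Set.ofList x).contains t.2.1 &&
        (PySem.Set.ofList x).contains t.2.2.1 && (PySem.Set.ofList x).contains t.2.2.2) = true
        ↔ t.1 ∈ x ∧ t.2.1 ∈ x ∧ t.2.2.1 ∈ x ∧ t.2.2.2 ∈ x := by
      simp only [Bool.and_eq_true, PySem.Set.contains, List.contains_eq_mem, decide_eq_true_eq,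
        PySem.Set.mem_ofList]
      tauto
    rw [hc]
    constructor
    · rintro ((h | ⟨hx, hq⟩) | ⟨hq, m, hm, hIn⟩)
      · exact Or.inl h
      · exact Or.inr ⟨hq, x, Or.inl rfl, hx⟩
      · exact Or.inr ⟨hq, m, Or.inr hm, hIn⟩
    · rintro (h | ⟨hq, m, (rfl | hm), hIn⟩)
      · exact Or.inl (Or.inl h)
      · exact Or.inl (Or.inr ⟨hIn, hq⟩)
      · exact Or.inr ⟨hq, m, hm, hIn⟩

-- A's append-loop is a map
theorem pv_foldl_append_map (dihs : List (Int × (Int × Int × Int × Int)))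
    (f : (Int × (Int × Int × Int × Int)) → (Int × (Int × Int × Int × Int)))
    (acc : List (Int × (Int × Int × Int × Int))) :
    dihs.foldl (fun acc p => acc ++ [f p]) acc = acc ++ dihs.map f := by
  induction dihs generalizing acc with
  | nil => simp
  | cons x xs ih => simp [ih]

-- per-element flags agree for p ∈ dihs
theorem pv_flag_eq (ml : List (List Int)) (dihs : List (Int × (Int × Int × Int × Int)))
    (p : Int × (Int × Int × Int × Int)) (hp : p ∈ dihs) :
    ((if (pvActiveSet ml dihs).contains p.2 then (1 : Int) else 0), p.2)
    = ((if ml.any (fun m => m.contains p.2.1 && m.contains p.2.2.1 && m.contains p.2.2.2.1 && m.contains p.2.2.2.2) then (1 : Int) else 0),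
        (p.2.1, p.2.2.1, p.2.2.2.1, p.2.2.2.2)) := by
  have hmem : (pvActiveSet ml dihs).contains p.2 = true
      ↔ ml.any (fun m => m.contains p.2.1 && m.contains p.2.2.1 && m.contains p.2.2.2.1 && m.contains p.2.2.2.2) = true := by
    rw [show (pvActiveSet ml dihs).contains p.2 = true ↔ p.2 ∈ pvActiveSet ml dihs by
      simp [PySem.Set.contains, List.contains_eq_mem]]
    rw [pv_active_mem]
    simp only [List.any_eq_true, Bool.and_eq_true, List.contains_eq_mem, decide_eq_true_eq]
    constructor
    · rintro ⟨_, m, hm, h1, h2, h3, h4⟩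
      exact ⟨m, hm, ⟨⟨h1, h2⟩, h3⟩, h4⟩
    · rintro ⟨m, hm, ⟨⟨h1, h2⟩, h3⟩, h4⟩
      exact ⟨⟨p, hp, rfl⟩, m, hm, h1, h2, h3, h4⟩
  by_cases h : ml.any (fun m => m.contains p.2.1 && m.contains p.2.2.1 && m.contains p.2.2.2.1 && m.contains p.2.2.2.2) = true
  · rw [if_pos (hmem.mpr h), if_pos h]
  · rw [if_neg (fun hc => h (hmem.mp hc)), if_neg h]

-- ===== VERDICT =====
theorem get_dihedrals_by_indices_py_spec : Claim_equal_get_dihedrals_by_indices_py := by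
  intro match_list d_dihedrals _hdom hpre
  unfold Spec_get_dihedrals_by_indices_py
  unfold get_dihedrals_by_indices_py get_dihedrals_by_indices_py_alt
  cases hg : (PySem.Dict.mk d_dihedrals).get? "dihedrals" with
  | none =>
    exfalso
    rw [PySem.Dict.get?_eq_none_iff_not_mem_keys] at hg
    unfold Pre_get_dihedrals_by_indices_py at hpre
    exact hg (by simpa [PySem.Dict.keys, PySem.Dict.items, List.mem_map] using hpre)
  | some dihs =>
    simp only []
    rw [pv_foldl_append_map dihs
      (fun p => ((if match_list.any (fun m => m.contains p.2.1 && m.contains p.2.2.1 && m.contains p.2.2.2.1 && m.contains p.2.2.2.2) then (1 : Int) else 0), (p.2.1, p.2.2.1, p.2.2.2.1, p.2.2.2.2))) []]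
    simp only [List.nil_append]
    congr 2
    apply List.map_congr_left
    intro p hp
    exact (pv_flag_eq match_list dihs p hp).symm
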